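-- pv_equiv track=rewrite | github.com/fhir4ds/fhir4ds | fhir4ds/fhirpath/duckdb/fhir_model.py | _extract_type_from_choice_field
-- ===== SOURCE A (Python) =====
-- from typing import Any, Dict, List, Optional
--
-- def _extract_type_from_choice_field(field_name: str) -> Optional[str]:
--     """
--     Extract the FHIR type name from a choice type field name.
--
--     Args:
--         field_name: Field name like "valueQuantity", "effectiveDateTime"
--
--     Returns:
--         Type name like "Quantity", "dateTime", or None if not found
--     """
--     # Common type suffixes and their FHIR type names
--     # The key is the suffix to look for, value is the FHIR type
--     type_suffixes = {
--         # Primitive types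
--         "Boolean": "boolean",
--         "Integer": "integer",
--         "String": "string",
--         "Decimal": "decimal",
--         "Date": "date",
--         "DateTime": "dateTime",
--         "Time": "time",
--         "Instant": "instant",
--         "Uri": "uri",
--         "Url": "url",
--         "Canonical": "canonical",
--         "Oid": "oid",
--         "Uuid": "uuid",
--         # Complex types
--         "Quantity": "Quantity",
--         "CodeableConcept": "CodeableConcept",
--         "Coding": "Coding",
--         "Code": "code",
--         "Range": "Range",
--         "Ratio": "Ratio",
--         "Period": "Period",
--         "Reference": "Reference",
--         "SampledData": "SampledData",
--         "Timing": "Timing",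
--         "Attachment": "Attachment",
--         "Identifier": "Identifier",
--         "HumanName": "HumanName",
--         "Address": "Address",
--         "ContactPoint": "ContactPoint",
--         "Annotation": "Annotation",
--         "Age": "Age",
--         "Distance": "Distance",
--         "Duration": "Duration",
--         "Count": "Count",
--         "Money": "Money",
--         "Signature": "Signature",
--         "Extension": "Extension",
--         # Special
--         "Resource": "Resource",
--         "Base64Binary": "base64Binary",
--         "Markdown": "markdown",
--         "PositiveInt": "positiveInt",
--         "UnsignedInt": "unsignedInt",
--         "Id": "id",
--     }
--
--     # Try to match from longest suffix first (CodeableConcept before Coding)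
--     sorted_suffixes = sorted(type_suffixes.keys(), key=len, reverse=True)
--
--     for suffix in sorted_suffixes:
--         if field_name.endswith(suffix):
--             return type_suffixes[suffix]
--
--     return None
-- ===== SOURCE B (Python) =====
-- from typing import Optional
--
-- # Complex-type suffixes map to themselves; primitive-type suffixes map to the
-- # suffix with its first letter lowercased. Two membership sets replace the
-- # suffix->type dict, and the longest-first rule is realised by walking the
-- # input's own tails from the longest down instead of sorting the keys.
--
-- _PRIMITIVE_SUFFIXES = frozenset({
--     "Boolean", "Integer", "String", "Decimal", "Date", "DateTime", "Time",
--     "Instant", "Uri", "Url", "Canonical", "Oid", "Uuid", "Code",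
--     "Base64Binary", "Markdown", "PositiveInt", "UnsignedInt", "Id",
-- })
--
-- _COMPLEX_SUFFIXES = frozenset({
--     "Quantity", "CodeableConcept", "Coding", "Range", "Ratio", "Period",
--     "Reference", "SampledData", "Timing", "Attachment", "Identifier",
--     "HumanName", "Address", "ContactPoint", "Annotation", "Age", "Distance",
--     "Duration", "Count", "Money", "Signature", "Extension", "Resource",
-- })
--
--
-- def _extract_type_from_choice_field(field_name: str) -> Optional[str]:
--     """
--     Extract the FHIR type name from a choice type field name.
--
--     Walk the tails of field_name from the longest to the shortest; the first
--     tail that is a known suffix is the longest matching suffix.  No suffix is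
--     longer than 15 characters ("CodeableConcept"), so start 15 from the end.
--     """
--     for i in range(max(len(field_name) - 15, 0), len(field_name)):
--         tail = field_name[i:]
--         if tail in _COMPLEX_SUFFIXES:
--             return tail
--         if tail in _PRIMITIVE_SUFFIXES:
--             return tail[:1].lower() + tail[1:]
--     return None
-- ===== Notes on version B (the rewrite author's own statement) =====
-- stated objective: alternative
-- what changed: B drops the suffix->type dict and the sort entirely: it keeps two membership sets (complex suffixes map to themselves, primitive suffixes map to their decapitalisation tail[:1].lower()+tail[1:]) and walks the tails of the last 15 characters of field_name from longest to shortest (no suffix is longer), returning at the first tail found in a set -- the longest matching suffix by construction.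
import Mathlib
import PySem

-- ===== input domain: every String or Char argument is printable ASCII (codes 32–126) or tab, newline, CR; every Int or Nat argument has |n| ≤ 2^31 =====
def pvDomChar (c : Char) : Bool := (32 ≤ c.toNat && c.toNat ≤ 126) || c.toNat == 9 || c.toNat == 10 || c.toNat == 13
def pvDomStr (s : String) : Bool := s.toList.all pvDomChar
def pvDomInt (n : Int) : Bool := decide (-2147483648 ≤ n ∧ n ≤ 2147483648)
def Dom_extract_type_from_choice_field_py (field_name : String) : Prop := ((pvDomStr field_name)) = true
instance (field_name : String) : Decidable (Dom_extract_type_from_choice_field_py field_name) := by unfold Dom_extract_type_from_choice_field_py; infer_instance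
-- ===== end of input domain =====

-- B drops A's suffix→type dict and key sort: two membership sets (complex suffixes map to
-- themselves, primitive ones to their decapitalisation) and a walk over the input's own tails,
-- longest first — the first tail found in a set is the longest matching suffix (objective: alternative).

-- ===== PORT A =====
-- the suffix→type table A declares (a local dict in the Python)
def pvTypeSuffixes : PySem.Dict String String := PySem.Dict.ofList [
    ("Boolean", "boolean"),
    ("Integer", "integer"),
    ("String", "string"),
    ("Decimal", "decimal"),
    ("Date", "date"),
    ("DateTime", "dateTime"),
    ("Time", "time"),
    ("Instant", "instant"),
    ("Uri", "uri"),
    ("Url", "url"),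
    ("Canonical", "canonical"),
    ("Oid", "oid"),
    ("Uuid", "uuid"),
    ("Quantity", "Quantity"),
    ("CodeableConcept", "CodeableConcept"),
    ("Coding", "Coding"),
    ("Code", "code"),
    ("Range", "Range"),
    ("Ratio", "Ratio"),
    ("Period", "Period"),
    ("Reference", "Reference"),
    ("SampledData", "SampledData"),
    ("Timing", "Timing"),
    ("Attachment", "Attachment"),
    ("Identifier", "Identifier"),
    ("HumanName", "HumanName"),
    ("Address", "Address"),
    ("ContactPoint", "ContactPoint"),
    ("Annotation", "Annotation"),
    ("Age", "Age"),
    ("Distance", "Distance"),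
    ("Duration", "Duration"),
    ("Count", "Count"),
    ("Money", "Money"),
    ("Signature", "Signature"),
    ("Extension", "Extension"),
    ("Resource", "Resource"),
    ("Base64Binary", "base64Binary"),
    ("Markdown", "markdown"),
    ("PositiveInt", "positiveInt"),
    ("UnsignedInt", "unsignedInt"),
    ("Id", "id")]

-- the 'for suffix in sorted_suffixes: if field_name.endswith(suffix): return type_suffixes[suffix]' loop
-- ('type_suffixes[suffix]' can never raise here since suffix is one of the dict's keys; ported as getD)
def pvScanA (d : PySem.Dict String String) (t : String) : List String → Option String
  | [] => none
  | k :: rest =>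
      if PySem.Str.endswith t k then some (PySem.Dict.getD d k "")
      else pvScanA d t rest

def extract_type_from_choice_field_py (field_name : String) : Option String :=
  pvScanA pvTypeSuffixes field_name
    (PySem.List.sorted (PySem.Dict.keys pvTypeSuffixes) (fun s => PySem.Str.len s) true)

-- ===== PORT B =====
-- the two frozensets of Source B
def pvPrimitiveSuffixes : PySem.Set String := PySem.Set.ofList [
    "Boolean", "Integer", "String", "Decimal", "Date", "DateTime", "Time",
    "Instant", "Uri", "Url", "Canonical", "Oid", "Uuid", "Code",
    "Base64Binary", "Markdown", "PositiveInt", "UnsignedInt", "Id"]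

def pvComplexSuffixes : PySem.Set String := PySem.Set.ofList [
    "Quantity", "CodeableConcept", "Coding", "Range", "Ratio", "Period",
    "Reference", "SampledData", "Timing", "Attachment", "Identifier",
    "HumanName", "Address", "ContactPoint", "Annotation", "Age", "Distance",
    "Duration", "Count", "Money", "Signature", "Extension", "Resource"]

-- tail[:1].lower() + tail[1:]  (string concatenation done on the List Char side, exactly)
def pvDecap (s : String) : String :=
  String.ofList (PySem.Chars.lower (PySem.Chars.slice s.toList none (some 1)) ++
                 PySem.Chars.slice s.toList (some 1) none)

-- the 'for i in range(max(len(field_name) - 15, 0), len(field_name)): tail = field_name[i:]; …' loop of Source B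
def pvScanTails (t : String) : List Int → Option String
  | [] => none
  | i :: rest =>
      let tail := PySem.Str.slice t (some i) none
      if PySem.Set.contains pvComplexSuffixes tail then some tail
      else if PySem.Set.contains pvPrimitiveSuffixes tail then some (pvDecap tail)
      else pvScanTails t rest

def extract_type_from_choice_field_py_alt (field_name : String) : Option String :=
  pvScanTails field_name
    (PySem.List.pyRange (max (PySem.Str.len field_name - 15) 0) (PySem.Str.len field_name) 1)

-- ===== PRECONDITION & SPEC =====
def Spec_extract_type_from_choice_field_py (field_name : String) (out : Option String) : Prop := out = extract_type_from_choice_field_py_alt field_name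
instance (field_name : String) (out : Option String) : Decidable (Spec_extract_type_from_choice_field_py field_name out) := by unfold Spec_extract_type_from_choice_field_py; infer_instance

-- ===== CLAIM (what is proved, stated in full; the proofs are below) =====
def Claim_equal_extract_type_from_choice_field_py : Prop := ∀ (field_name : String), Dom_extract_type_from_choice_field_py field_name → Spec_extract_type_from_choice_field_py field_name (extract_type_from_choice_field_py field_name)

-- ===== LEMMAS AND PROOFS =====

-- A's sorted suffix list, grouped by length (descending): per group the length and the
-- (suffix, type) pairs in scan order
def pvGroups : List (Nat × List (String × String)) := [
    (15, [("CodeableConcept", "CodeableConcept")]),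
    (12, [("ContactPoint", "ContactPoint"), ("Base64Binary", "base64Binary")]),
    (11, [("SampledData", "SampledData"), ("PositiveInt", "positiveInt"), ("UnsignedInt", "unsignedInt")]),
    (10, [("Attachment", "Attachment"), ("Identifier", "Identifier"), ("Annotation", "Annotation")]),
    (9, [("Canonical", "canonical"), ("Reference", "Reference"), ("HumanName", "HumanName"), ("Signature", "Signature"), ("Extension", "Extension")]),
    (8, [("DateTime", "dateTime"), ("Quantity", "Quantity"), ("Distance", "Distance"), ("Duration", "Duration"), ("Resource", "Resource"), ("Markdown", "markdown")]),
    (7, [("Boolean", "boolean"), ("Integer", "integer"), ("Decimal", "decimal"), ("Instant", "instant"), ("Address", "Address")]),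
    (6, [("String", "string"), ("Coding", "Coding"), ("Period", "Period"), ("Timing", "Timing")]),
    (5, [("Range", "Range"), ("Ratio", "Ratio"), ("Count", "Count"), ("Money", "Money")]),
    (4, [("Date", "date"), ("Time", "time"), ("Uuid", "uuid"), ("Code", "code")]),
    (3, [("Uri", "uri"), ("Url", "url"), ("Oid", "oid"), ("Age", "Age")]),
    (2, [("Id", "id")])]

-- the distinct suffix lengths, descending
def pvLens : List Nat := [15, 12, 11, 10, 9, 8, 7, 6, 5, 4, 3, 2]

-- proof-side reference scan: lengths descending, guarded dict lookup of the tail of that length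
def pvLenScan (d : PySem.Dict String String) (t : String) : List Int → Option String
  | [] => none
  | L :: rest =>
      if L ≤ PySem.Str.len t then
        match PySem.Dict.get? d (PySem.Str.slice t (some (PySem.Str.len t - L)) none) with
        | some v => some v
        | none => pvLenScan d t rest
      else pvLenScan d t rest

-- equation lemmas (definitional)
lemma pvScanA_cons (d : PySem.Dict String String) (t k : String) (rest : List String) :
    pvScanA d t (k :: rest) =
      if PySem.Str.endswith t k then some (PySem.Dict.getD d k "")
      else pvScanA d t rest := rfl

lemma pvLenScan_cons (d : PySem.Dict String String) (t : String) (L : Int) (rest : List Int) :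
    pvLenScan d t (L :: rest) =
      (if L ≤ PySem.Str.len t then
        match PySem.Dict.get? d (PySem.Str.slice t (some (PySem.Str.len t - L)) none) with
        | some v => some v
        | none => pvLenScan d t rest
      else pvLenScan d t rest) := rfl

lemma pvScanTails_cons (t : String) (i : Int) (rest : List Int) :
    pvScanTails t (i :: rest) =
      (if PySem.Set.contains pvComplexSuffixes (PySem.Str.slice t (some i) none) then
        some (PySem.Str.slice t (some i) none)
      else if PySem.Set.contains pvPrimitiveSuffixes (PySem.Str.slice t (some i) none) then
        some (pvDecap (PySem.Str.slice t (some i) none))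
      else pvScanTails t rest) := rfl

-- endswith against a key of length L is equality of the length-L tail with the key
lemma pv_ends_eq (t k : String) (L : Nat) (hk : k.toList.length = L) :
    PySem.Str.endswith t k = decide (t.toList.drop (t.toList.length - L) = k.toList) := by
  rw [PySem.Str.endswith_eq, Bool.eq_iff_iff, PySem.Chars.endswith_iff, decide_eq_true_iff,
    List.suffix_iff_eq_drop, hk]
  exact eq_comm

-- endswith against a key longer than t is false
lemma pv_ends_false (t k : String) (L : Nat) (hk : k.toList.length = L)
    (hL : t.toList.length < L) : PySem.Str.endswith t k = false := by
  rw [PySem.Str.endswith_eq]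
  by_contra hb
  simp at hb
  have := ((PySem.Chars.endswith_iff _ _).mp hb).length_le
  omega

-- a whole too-long group is skipped by A's scan
lemma pv_group_skip (d : PySem.Dict String String) (t : String) (L : Nat) (rest : List String)
    (hL : t.toList.length < L) :
    ∀ ps : List (String × String), (∀ p ∈ ps, p.1.toList.length = L) →
      pvScanA d t (ps.map Prod.fst ++ rest) = pvScanA d t rest := by
  intro ps
  induction ps with
  | nil => simp
  | cons p ps ih =>
      intro hps
      simp only [List.map_cons, List.cons_append, pvScanA_cons]
      rw [pv_ends_false t p.1 L (hps p (by simp)) hL]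
      simp
      exact ih (fun q hq => hps q (by simp [hq]))

-- A's scan of one length-L group equals a single dict lookup of the length-L tail
lemma pv_group_scan (d : PySem.Dict String String) (t c : String) (L : Nat) (rest : List String)
    (hc : c.toList = t.toList.drop (t.toList.length - L)) :
    ∀ ps : List (String × String),
      (∀ p ∈ ps, p.1.toList.length = L ∧ d.get? p.1 = some p.2) →
      (d.get? c = none ∨ c ∈ ps.map Prod.fst) →
      pvScanA d t (ps.map Prod.fst ++ rest) =
        (match d.get? c with
          | some v => some v
          | none => pvScanA d t rest) := by
  intro ps
  induction ps with
  | nil =>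
      intro _ hor
      have hnone : d.get? c = none := by
        rcases hor with h | h
        · exact h
        · simp at h
      simp [hnone]
  | cons p ps ih =>
      intro hps hor
      have hp := hps p (by simp)
      simp only [List.map_cons, List.cons_append, pvScanA_cons]
      by_cases hpc : c = p.1
      · have het : PySem.Str.endswith t p.1 = true := by
          rw [pv_ends_eq t p.1 L hp.1, ← hc, ← hpc]
          simp
        rw [het]
        have hv : d.get? c = some p.2 := by rw [hpc]; exact hp.2
        rw [hv]
        simp [PySem.Dict.getD_of_get?_eq_some _ _ hp.2]
      · have hef : PySem.Str.endswith t p.1 = false := by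
          rw [pv_ends_eq t p.1 L hp.1, ← hc]
          simp
          exact fun he => hpc (String.toList_inj.mp he)
        rw [hef]
        simp only [Bool.false_eq_true, if_false]
        refine ih (fun q hq => hps q (by simp [hq])) ?_
        rcases hor with h | h
        · exact Or.inl h
        · simp at h
          rcases h with h | h
          · exact absurd h.symm (fun he => hpc he.symm)
          · exact Or.inr (by simpa using h)

-- the chained group scans of A equal the guarded length scan over the group lengths
lemma pv_chain (d : PySem.Dict String String) (t : String) :
    ∀ tb : List (Nat × List (String × String)),
      (∀ g ∈ tb, ∀ p ∈ g.2, p.1.toList.length = g.1 ∧ d.get? p.1 = some p.2) →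
      (∀ g ∈ tb, ∀ key ∈ d.keys, key.toList.length = g.1 → key ∈ g.2.map Prod.fst) →
      pvScanA d t (tb.flatMap (fun g => g.2.map Prod.fst)) =
        pvLenScan d t (tb.map (fun g => ((g.1 : Nat) : Int))) := by
  intro tb
  induction tb with
  | nil => intro _ _; rfl
  | cons g tb ih =>
      intro hvals hkeys
      simp only [List.flatMap_cons, List.map_cons, pvLenScan_cons, PySem.Str.len_eq]
      by_cases hL : g.1 ≤ t.toList.length
      · rw [if_pos (by exact_mod_cast hL)]
        set c := PySem.Str.slice t (some ((t.toList.length : Int) - (g.1 : Int))) none with hcdef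
        have hc : c.toList = t.toList.drop (t.toList.length - g.1) := by
          have h0 : (0 : Int) ≤ (t.toList.length : Int) - (g.1 : Int) := by omega
          rw [hcdef]
          simp only [PySem.Str.slice, PySem.Chars.slice, String.toList_ofList]
          rw [PySem.List.slice_from _ h0]
          congr 1
          omega
        have hor : d.get? c = none ∨ c ∈ g.2.map Prod.fst := by
          by_cases hmem : c ∈ d.keys
          · refine Or.inr (hkeys g (by simp) c hmem ?_)
            rw [hc]
            simp only [List.length_drop]
            omega
          · exact Or.inl ((PySem.Dict.get?_eq_none_iff_not_mem_keys _ _).mpr hmem)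
        rw [pv_group_scan d t c g.1 (tb.flatMap (fun g => g.2.map Prod.fst)) hc g.2
              (fun p hp => hvals g (by simp) p hp) hor]
        cases hget : d.get? c with
        | some v => simp
        | none =>
            simp only
            exact ih (fun g' hg' => hvals g' (by simp [hg'])) (fun g' hg' => hkeys g' (by simp [hg']))
      · rw [if_neg (by exact_mod_cast hL)]
        rw [pv_group_skip d t g.1 _ (by omega) g.2 (fun p hp => (hvals g (by simp) p hp).1)]
        exact ih (fun g' hg' => hvals g' (by simp [hg'])) (fun g' hg' => hkeys g' (by simp [hg']))

-- the sorted key list is exactly the grouped literals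
set_option maxRecDepth 100000 in
lemma pv_sortedA_eq :
    PySem.List.sorted (PySem.Dict.keys pvTypeSuffixes) (fun s => PySem.Str.len s) true =
      pvGroups.flatMap (fun g => g.2.map Prod.fst) := by decide

-- the group lengths are pvLens
set_option maxRecDepth 100000 in
lemma pv_groups_lens : pvGroups.map (fun g => ((g.1 : Nat) : Int)) = pvLens.map (fun L => ((L : Nat) : Int)) := by decide

-- ===== finite facts connecting B's sets to A's dict =====

set_option maxRecDepth 100000 in
lemma pv_complex_lookup : ∀ c ∈ (pvComplexSuffixes : List String), PySem.Dict.get? pvTypeSuffixes c = some c := by decide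

set_option maxRecDepth 100000 in
lemma pv_primitive_lookup : ∀ c ∈ (pvPrimitiveSuffixes : List String), PySem.Dict.get? pvTypeSuffixes c = some (pvDecap c) := by decide

set_option maxRecDepth 100000 in
lemma pv_keys_subset : ∀ c ∈ PySem.Dict.keys pvTypeSuffixes, c ∈ (pvComplexSuffixes : List String) ∨ c ∈ (pvPrimitiveSuffixes : List String) := by decide

set_option maxRecDepth 100000 in
lemma pv_member_lens : ∀ c ∈ (pvComplexSuffixes : List String) ++ (pvPrimitiveSuffixes : List String), c.toList.length ∈ pvLens := by decide

-- a tail in neither set is not a key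
lemma pv_nonmember_get (c : String)
    (hc : PySem.Set.contains pvComplexSuffixes c = false)
    (hp : PySem.Set.contains pvPrimitiveSuffixes c = false) :
    PySem.Dict.get? pvTypeSuffixes c = none := by
  refine (PySem.Dict.get?_eq_none_iff_not_mem_keys _ _).mpr (fun hk => ?_)
  rcases pv_keys_subset c hk with h | h
  · rw [(PySem.Set.contains_iff pvComplexSuffixes c).symm.mp h] at hc; simp at hc
  · rw [(PySem.Set.contains_iff pvPrimitiveSuffixes c).symm.mp h] at hp; simp at hp

-- filter split, member case
lemma pv_filter_mem (K : Nat) (h : K + 1 ∈ pvLens) :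
    pvLens.filter (fun L => L ≤ K + 1) = (K + 1) :: pvLens.filter (fun L => L ≤ K) := by
  simp only [pvLens, List.mem_cons, List.not_mem_nil, or_false] at h
  have h' : K = 14 ∨ K = 11 ∨ K = 10 ∨ K = 9 ∨ K = 8 ∨ K = 7 ∨ K = 6 ∨ K = 5 ∨ K = 4 ∨
      K = 3 ∨ K = 2 ∨ K = 1 := by omega
  rcases h' with rfl | rfl | rfl | rfl | rfl | rfl | rfl | rfl | rfl | rfl | rfl | rfl <;> decide

-- filter split, non-member case
lemma pv_filter_not_mem (K : Nat) (h : K + 1 ∉ pvLens) :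
    pvLens.filter (fun L => L ≤ K + 1) = pvLens.filter (fun L => L ≤ K) := by
  refine List.filter_congr (fun L hL => ?_)
  have : L ≠ K + 1 := fun he => h (he ▸ hL)
  simp only [decide_eq_decide]
  omega

-- dropping the filter under the guard
lemma pv_filter_drop (d : PySem.Dict String String) (t : String) (ls : List Nat) :
    pvLenScan d t ((ls.filter (fun L => L ≤ t.toList.length)).map (fun L => ((L : Nat) : Int))) =
      pvLenScan d t (ls.map (fun L => ((L : Nat) : Int))) := by
  induction ls with
  | nil => rfl
  | cons L ls ih =>
      by_cases hL : L ≤ t.toList.length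
      · rw [List.filter_cons_of_pos (by simpa using hL)]
        simp only [List.map_cons, pvLenScan_cons]
        rw [ih]
      · rw [List.filter_cons_of_neg (by simpa using hL)]
        rw [List.map_cons, pvLenScan_cons,
          if_neg (by simp only [PySem.Str.len_eq]; intro hb; exact hL (by exact_mod_cast hb))]
        exact ih

-- every suffix length is at most 15
lemma pv_lens_le : ∀ L ∈ pvLens, L ≤ 15 := by decide

-- the tail scan from index n-K equals the guarded length scan over the lengths ≤ K
lemma pv_tail_scan (t : String) : ∀ K : Nat, K ≤ t.toList.length →
    pvScanTails t (PySem.List.pyRange ((t.toList.length - K : Nat) : Int) ((t.toList.length : Nat) : Int) 1) =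
      pvLenScan pvTypeSuffixes t ((pvLens.filter (fun L => L ≤ K)).map (fun L => ((L : Nat) : Int))) := by
  intro K
  induction K with
  | zero =>
      intro _
      rw [Nat.sub_zero]
      have h1 : PySem.List.pyRange ((t.toList.length : Nat) : Int) ((t.toList.length : Nat) : Int) 1 = ([] : List Int) := by
        simp [pysem]
      rw [h1]
      have h2 : pvLens.filter (fun L => L ≤ 0) = [] := by decide
      rw [h2]
      rfl
  | succ K ih =>
      intro hK
      set n := t.toList.length with hn
      have hlt : ((n - (K + 1) : Nat) : Int) < ((n : Nat) : Int) := by omega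
      rw [PySem.List.pyRange_one_cons hlt]
      have hstep : ((n - (K + 1) : Nat) : Int) + 1 = ((n - K : Nat) : Int) := by omega
      rw [hstep, pvScanTails_cons]
      -- the tail examined at this step
      set tail := PySem.Str.slice t (some ((n - (K + 1) : Nat) : Int)) none with htdef
      have htail : tail.toList = t.toList.drop (n - (K + 1)) := by
        rw [htdef]
        simp only [PySem.Str.slice, PySem.Chars.slice, String.toList_ofList]
        rw [PySem.List.slice_from _ (by omega)]
        simp
      have hlen : tail.toList.length = K + 1 := by
        rw [htail, List.length_drop]
        omega
      by_cases hmem : K + 1 ∈ pvLens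
      · -- a key length: the guarded scan also examines this tail
        rw [pv_filter_mem K hmem]
        simp only [List.map_cons, pvLenScan_cons]
        have hguard : ((K + 1 : Nat) : Int) ≤ PySem.Str.len t := by
          simp only [PySem.Str.len_eq]
          exact_mod_cast (by omega : K + 1 ≤ t.toList.length)
        rw [if_pos hguard]
        have hceq : PySem.Str.slice t (some (PySem.Str.len t - ((K + 1 : Nat) : Int))) none = tail := by
          rw [htdef]
          congr 1
          simp only [PySem.Str.len_eq]
          congr 1
          omega
        rw [hceq]
        by_cases hcs : PySem.Set.contains pvComplexSuffixes tail = true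
        · have hmC := (PySem.Set.contains_iff pvComplexSuffixes tail).mp hcs
          have hget := pv_complex_lookup tail hmC
          simp [hmC, hget]
        · rw [Bool.not_eq_true] at hcs
          have hnC : tail ∉ (pvComplexSuffixes : List String) := fun h => by
            rw [(PySem.Set.contains_iff pvComplexSuffixes tail).mpr h] at hcs
            simp at hcs
          by_cases hps : PySem.Set.contains pvPrimitiveSuffixes tail = true
          · have hmP := (PySem.Set.contains_iff pvPrimitiveSuffixes tail).mp hps
            have hget := pv_primitive_lookup tail hmP
            simp [hnC, hmP, hget]
          · rw [Bool.not_eq_true] at hps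
            rw [pv_nonmember_get tail hcs hps]
            simp only [hcs, hps, Bool.false_eq_true, if_false]
            exact ih (by omega)
      · -- not a key length: the tail is in neither set and the filter is unchanged
        rw [pv_filter_not_mem K hmem]
        have hcs : PySem.Set.contains pvComplexSuffixes tail = false := by
          by_contra hb
          rw [Bool.not_eq_false] at hb
          have := pv_member_lens tail (List.mem_append_left _ ((PySem.Set.contains_iff _ _).mp hb))
          rw [hlen] at this
          exact hmem this
        have hps : PySem.Set.contains pvPrimitiveSuffixes tail = false := by
          by_contra hb
          rw [Bool.not_eq_false] at hb
          have := pv_member_lens tail (List.mem_append_right _ ((PySem.Set.contains_iff _ _).mp hb))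
          rw [hlen] at this
          exact hmem this
        simp only [hcs, hps, Bool.false_eq_true, if_false]
        exact ih (by omega)

-- ===== VERDICT (by name: the statement is the Claim_ definition above) =====
set_option maxRecDepth 1000000 in
theorem extract_type_from_choice_field_py_spec : Claim_equal_extract_type_from_choice_field_py := by
  intro t _
  unfold Spec_extract_type_from_choice_field_py
  unfold extract_type_from_choice_field_py extract_type_from_choice_field_py_alt
  rw [pv_sortedA_eq]
  rw [pv_chain pvTypeSuffixes t pvGroups (by decide) (by decide)]
  rw [pv_groups_lens, ← pv_filter_drop pvTypeSuffixes t pvLens]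
  have hfilt : pvLens.filter (fun L => L ≤ t.toList.length) =
      pvLens.filter (fun L => L ≤ min t.toList.length 15) := by
    refine List.filter_congr (fun L hL => ?_)
    have h15 := pv_lens_le L hL
    simp only [decide_eq_decide]
    omega
  rw [hfilt, ← pv_tail_scan t (min t.toList.length 15) (min_le_left _ _)]
  have hr : ((t.toList.length : Nat) : Int) = PySem.Str.len t := by simp [pysem]
  have hs : ((t.toList.length - min t.toList.length 15 : Nat) : Int) =
      max (PySem.Str.len t - 15) 0 := by
    rw [← hr]
    omega
  rw [hr, hs]
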